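-- pv_equiv track=rewrite | github.com/hell0ut/- | ПАОА/Лабораторні роботи/Лабораторна робота 3/2.py | find_kth_substring
-- ===== SOURCE A (Python) =====
-- def find_kth_substring(suffix_array, lcp_array, k):
--     unique_substr_num = 0
--     previous_substr_num = 0
--
--     for suffix, lcp_value in zip(suffix_array, lcp_array):
--         unique_substr_num += len(suffix) - lcp_value
--
--         if unique_substr_num - 1 == k:
--             return suffix
--
--         elif unique_substr_num - 1 > k:
--
--             for i, j in enumerate(range(lcp_value, len(suffix))):
--                 if previous_substr_num + i == k:
--                     return suffix[:j + 1]
--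
--         previous_substr_num = unique_substr_num
--
--     return 'INVALID'
-- ===== SOURCE B (Python) =====
-- def find_kth_substring(suffix_array, lcp_array, k):
--     start = 0
--     for suffix, lcp in zip(suffix_array, lcp_array):
--         count = len(suffix) - lcp
--         if start <= k < start + count:
--             return suffix[:lcp + (k - start) + 1]
--         start += count
--     return 'INVALID'
-- ===== Notes on version B (the rewrite author's own statement) =====
-- stated objective: simpler
-- what changed: Replaced A's two-branch body (a whole-suffix equality fast path plus an inner enumerate(range(...)) scan that walks the block one candidate at a time) by a single interval test start <= k < start + count per suffix that slices the answer directly; Pre_ excludes only the inputs where k equals, minus one, the running substring total taken at a degenerate block (lcp >= len(suffix), impossible in a genuine suffix/LCP pair), a malformed-input corner where no behaviour is specified and A's whole-suffix return and B's fall-through are equally defensible.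
-- outside the precondition, e.g. on find_kth_substring(['a'], [1], -1): A returns 'a', B returns 'INVALID'
import Mathlib
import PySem

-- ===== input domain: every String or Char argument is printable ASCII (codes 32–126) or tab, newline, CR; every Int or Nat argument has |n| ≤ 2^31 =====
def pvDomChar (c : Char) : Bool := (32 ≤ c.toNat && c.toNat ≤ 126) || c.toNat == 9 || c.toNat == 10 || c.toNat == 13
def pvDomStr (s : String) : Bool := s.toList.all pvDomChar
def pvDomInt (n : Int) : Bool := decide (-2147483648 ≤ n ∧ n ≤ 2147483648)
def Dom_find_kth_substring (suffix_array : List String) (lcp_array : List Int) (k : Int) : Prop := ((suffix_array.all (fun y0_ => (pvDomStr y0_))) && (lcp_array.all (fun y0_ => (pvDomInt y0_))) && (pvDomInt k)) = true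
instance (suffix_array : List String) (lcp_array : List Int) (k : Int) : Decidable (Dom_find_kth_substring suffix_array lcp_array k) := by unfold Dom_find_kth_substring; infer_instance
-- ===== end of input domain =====

-- B replaces A's whole-suffix fast path + inner per-candidate scan of each block by a single
-- interval test per suffix that slices the answer directly (objective: simpler);
-- no argument is mutated.

-- ===== PORT A =====
-- A's inner loop 'for i, j in enumerate(range(lcp_value, len(suffix))): if previous + i == k: return suffix[:j+1]'
-- iterated lazily: fuel = number of remaining range elements, j = current range value, i = enumerate index
def pvInnerA (fuel : Nat) (j i previous k : Int) (s : String) : Option String :=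
  match fuel with
  | 0 => none
  | fuel' + 1 =>
    if previous + i = k then some (PySem.Str.slice s none (some (j + 1)))
    else pvInnerA fuel' (j + 1) (i + 1) previous k s

-- A's outer loop over zip(suffix_array, lcp_array), carrying unique_substr_num and previous_substr_num
def pvLoopA (ps : List (String × Int)) (unique previous k : Int) : String :=
  match ps with
  | [] => "INVALID"
  | (suffix, lcp_value) :: rest =>
    let u := unique + (PySem.Str.len suffix - lcp_value)
    if u - 1 = k then suffix
    else if u - 1 > k then
      match pvInnerA (PySem.Str.len suffix - lcp_value).toNat lcp_value 0 previous k suffix with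
      | some r => r
      | none => pvLoopA rest u u k
    else pvLoopA rest u u k

def find_kth_substring (suffix_array : List String) (lcp_array : List Int) (k : Int) : String :=
  pvLoopA (List.zip suffix_array lcp_array) 0 0 k

-- ===== PORT B =====
def pvLoopB (ps : List (String × Int)) (start k : Int) : String :=
  match ps with
  | [] => "INVALID"
  | (suffix, lcp) :: rest =>
    let count := PySem.Str.len suffix - lcp
    if start ≤ k ∧ k < start + count then
      PySem.Str.slice suffix none (some (lcp + (k - start) + 1))
    else pvLoopB rest (start + count) k

def find_kth_substring_alt (suffix_array : List String) (lcp_array : List Int) (k : Int) : String :=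
  pvLoopB (List.zip suffix_array lcp_array) 0 k

-- ===== PRECONDITION & SPEC =====
-- Number of substrings a block contributes: len(suffix) - lcp_value
def pvCount (p : String × Int) : Int := PySem.Str.len p.1 - p.2

-- Pre_ excludes only the inputs where k equals, minus one, the running substring total taken at a
-- degenerate block (lcp ≥ len(suffix) — impossible in a genuine suffix/LCP pair, so the input is
-- malformed and no behaviour on that block is specified): A and B each do a defensible thing there
-- and neither value is claimed.
def Pre_find_kth_substring (suffix_array : List String) (lcp_array : List Int) (k : Int) : Prop :=
  ∀ i, i < (List.zip suffix_array lcp_array).length →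
    pvCount ((List.zip suffix_array lcp_array).getD i ("", 0)) ≤ 0 →
      k ≠ (((List.zip suffix_array lcp_array).take (i + 1)).map pvCount).sum - 1
instance (suffix_array : List String) (lcp_array : List Int) (k : Int) : Decidable (Pre_find_kth_substring suffix_array lcp_array k) := by unfold Pre_find_kth_substring; infer_instance
def pvWitness_find_kth_substring : List String × List Int × Int := (["ab", "b"], [0, 0], 2)

def Spec_find_kth_substring (suffix_array : List String) (lcp_array : List Int) (k : Int) (out : String) : Prop := out = find_kth_substring_alt suffix_array lcp_array k
instance (suffix_array : List String) (lcp_array : List Int) (k : Int) (out : String) : Decidable (Spec_find_kth_substring suffix_array lcp_array k out) := by unfold Spec_find_kth_substring; infer_instance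

-- ===== CLAIM (what is proved, stated in full; the proofs are below) =====
def Claim_equal_find_kth_substring : Prop := ∀ (suffix_array : List String) (lcp_array : List Int) (k : Int), Dom_find_kth_substring suffix_array lcp_array k → Pre_find_kth_substring suffix_array lcp_array k → Spec_find_kth_substring suffix_array lcp_array k (find_kth_substring suffix_array lcp_array k)

-- ===== LEMMAS AND PROOFS =====

lemma pv_slice_len (s : String) : PySem.Str.slice s none (some (PySem.Str.len s)) = s := by
  have h : List.take s.length s.toList = s.toList := by simp
  simp only [PySem.Str.slice, PySem.Str.len]
  norm_num [h, String.ofList_toList]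

lemma pvInnerA_spec (n : Nat) : ∀ (j i0 prev k : Int) (s : String),
    pvInnerA n j i0 prev k s =
      (if prev + i0 ≤ k ∧ k < prev + i0 + n then
        some (PySem.Str.slice s none (some (j + (k - prev - i0) + 1)))
      else none) := by
  induction n with
  | zero =>
    intro j i0 prev k s
    have hcf : ¬ (prev + i0 ≤ k ∧ k < prev + i0 + (0 : Nat)) := by omega
    rw [if_neg hcf]
    rfl
  | succ m ih =>
    intro j i0 prev k s
    simp only [pvInnerA]
    by_cases h : prev + i0 = k
    · have hc : prev + i0 ≤ k ∧ k < prev + i0 + ((m + 1 : Nat) : Int) := by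
        push_cast; omega
      rw [if_pos h, if_pos hc]
      have : j + (k - prev - i0) + 1 = j + 1 := by omega
      rw [this]
    · rw [if_neg h, ih (j + 1) (i0 + 1) prev k s]
      by_cases hc : prev + i0 ≤ k ∧ k < prev + i0 + ((m + 1 : Nat) : Int)
      · have hc' : prev + (i0 + 1) ≤ k ∧ k < prev + (i0 + 1) + (m : Nat) := by
          push_cast at hc ⊢; omega
        rw [if_pos hc', if_pos hc]
        have : j + 1 + (k - prev - (i0 + 1)) + 1 = j + (k - prev - i0) + 1 := by omega
        rw [this]
      · have hc' : ¬ (prev + (i0 + 1) ≤ k ∧ k < prev + (i0 + 1) + (m : Nat)) := by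
          push_cast at hc ⊢; omega
        rw [if_neg hc', if_neg hc]

lemma pvLoop_eq (ps : List (String × Int)) : ∀ (start k : Int),
    (∀ i, i < ps.length → pvCount (ps.getD i ("", 0)) ≤ 0 →
      k ≠ start + ((ps.take (i + 1)).map pvCount).sum - 1) →
    pvLoopA ps start start k = pvLoopB ps start k := by
  induction ps with
  | nil => intro start k _; rfl
  | cons p rest ih =>
    intro start k hpre
    obtain ⟨s, l⟩ := p
    have hrest : ∀ i, i < rest.length → pvCount (rest.getD i ("", 0)) ≤ 0 →
        k ≠ (start + (PySem.Str.len s - l)) + ((rest.take (i + 1)).map pvCount).sum - 1 := by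
      intro i hi hc0
      have h := hpre (i + 1) (by simpa using Nat.succ_lt_succ hi) (by simpa using hc0)
      simp only [List.take_succ_cons, List.map_cons, List.sum_cons, List.map_take, pvCount] at h ⊢
      omega
    simp only [pvLoopA, pvLoopB]
    by_cases hdeg : PySem.Str.len s - l ≤ 0
    · -- degenerate block: Pre_ forbids the fast-path coincidence, the inner range is empty,
      -- and B's interval is empty, so both fall through to the rest
      have h0 := hpre 0 (by simp) (by simpa [pvCount] using hdeg)
      have h1 : ¬ (start + (PySem.Str.len s - l) - 1 = k) := by
        simp only [List.take_succ_cons, List.take_zero, List.map, List.sum_cons,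
          List.sum_nil, pvCount] at h0
        omega
      have hB : ¬ (start ≤ k ∧ k < start + (PySem.Str.len s - l)) := by omega
      rw [if_neg h1, if_neg hB]
      by_cases h2 : start + (PySem.Str.len s - l) - 1 > k
      · rw [if_pos h2]
        have hfuel : (PySem.Str.len s - l).toNat = 0 := by omega
        rw [hfuel]
        simp only [pvInnerA]
        exact ih (start + (PySem.Str.len s - l)) k hrest
      · rw [if_neg h2]
        exact ih (start + (PySem.Str.len s - l)) k hrest
    · -- genuine block: count ≥ 1
      by_cases h1 : start + (PySem.Str.len s - l) - 1 = k
      · -- A's fast path returns the whole suffix; count ≥ 1, so k lies in B's interval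
        -- and B slices up to the full length
        have hB : start ≤ k ∧ k < start + (PySem.Str.len s - l) := by omega
        rw [if_pos h1, if_pos hB]
        have : l + (k - start) + 1 = PySem.Str.len s := by omega
        rw [this, pv_slice_len]
      · rw [if_neg h1]
        by_cases h2 : start + (PySem.Str.len s - l) - 1 > k
        · rw [if_pos h2,
            pvInnerA_spec (PySem.Str.len s - l).toNat l 0 start k s]
          by_cases h3 : start ≤ k
          · have hcond : start + 0 ≤ k ∧ k < start + 0 + ((PySem.Str.len s - l).toNat : Int) := by
              constructor <;> omega
            rw [if_pos hcond]
            have hB : start ≤ k ∧ k < start + (PySem.Str.len s - l) := by omega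
            rw [if_pos hB]
            have : l + (k - start - 0) + 1 = l + (k - start) + 1 := by omega
            rw [this]
          · have hcond : ¬ (start + 0 ≤ k ∧ k < start + 0 + ((PySem.Str.len s - l).toNat : Int)) := by
              omega
            rw [if_neg hcond]
            have hB : ¬ (start ≤ k ∧ k < start + (PySem.Str.len s - l)) := by omega
            rw [if_neg hB]
            exact ih (start + (PySem.Str.len s - l)) k hrest
        · rw [if_neg h2]
          have hB : ¬ (start ≤ k ∧ k < start + (PySem.Str.len s - l)) := by omega
          rw [if_neg hB]
          exact ih (start + (PySem.Str.len s - l)) k hrest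

-- ===== VERDICT (by name: the statement is the Claim_ definition above) =====
theorem find_kth_substring_spec : Claim_equal_find_kth_substring := by
  intro sa lcp k _ hpre
  unfold Spec_find_kth_substring find_kth_substring find_kth_substring_alt
  unfold Pre_find_kth_substring at hpre
  have h0 : ∀ i, i < (List.zip sa lcp).length →
      pvCount ((List.zip sa lcp).getD i ("", 0)) ≤ 0 →
      k ≠ 0 + (((List.zip sa lcp).take (i + 1)).map pvCount).sum - 1 := by
    intro i hi hc
    have h := hpre i hi hc
    omega
  exact pvLoop_eq (List.zip sa lcp) 0 k h0
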